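-- pv_equiv track=rewrite | github.com/jamesthesnake/balatro-gym | enhanced_balatro_policy.py | _assess_hand_potential
-- ===== SOURCE A (Python) =====
-- from typing import Dict, Any, List, Tuple, Optional
--
-- def _assess_hand_potential(hand: List[Dict]) -> Dict[str, Any]:
--     """
--     Assess the potential of the current hand for various poker combinations.
--     """
--     potential = {
--         'pairs': 0,
--         'three_of_a_kind': 0,
--         'straight': 0,
--         'flush': 0,
--         'high_cards': 0
--     }
--
--     if not hand:
--         return potential
--
--     # Count ranks and suits
--     ranks = [card.get('rank', '?') for card in hand]
--     suits = [card.get('suit', '?') for card in hand]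
--
--     rank_counts = {rank: ranks.count(rank) for rank in set(ranks)}
--     suit_counts = {suit: suits.count(suit) for suit in set(suits)}
--
--     # Assess potential
--     potential['pairs'] = sum(1 for count in rank_counts.values() if count >= 2)
--     potential['three_of_a_kind'] = sum(1 for count in rank_counts.values() if count >= 3)
--     potential['flush'] = max(suit_counts.values()) if suit_counts else 0
--     potential['high_cards'] = len([rank for rank in ranks if rank in ['A', 'K', 'Q', 'J']])
--
--     return potential
-- ===== SOURCE B (Python) =====
-- def _runs(xs):
--     """Run-length encode a sorted list, recursively."""
--     if not xs:
--         return []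
--     rest = _runs(xs[1:])
--     if rest and rest[0][0] == xs[0]:
--         return [(xs[0], rest[0][1] + 1)] + rest[1:]
--     return [(xs[0], 1)] + rest
--
--
-- def _assess_hand_potential(hand):
--     pairs = trips = flush = high = 0
--     if hand:
--         ranks = sorted(card.get('rank', '?') for card in hand)
--         suits = sorted(card.get('suit', '?') for card in hand)
--         for _, n in _runs(ranks):
--             if n >= 2:
--                 pairs += 1
--             if n >= 3:
--                 trips += 1
--         for _, n in _runs(suits):
--             if n > flush:
--                 flush = n
--         high = sum(1 for r in ranks if r in ('A', 'K', 'Q', 'J'))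
--     return {
--         'pairs': pairs,
--         'three_of_a_kind': trips,
--         'straight': 0,
--         'flush': flush,
--         'high_cards': high
--     }
-- ===== Notes on version B (the rewrite author's own statement) =====
-- stated objective: alternative
-- what changed: Replaces A's set/dict counting passes (set(ranks), count() per distinct rank, dict of counts, sums over its values) by sorting ranks and suits and run-length encoding each sorted list recursively, tallying pairs/trips/flush from the run lengths in single scans.
import Mathlib
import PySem

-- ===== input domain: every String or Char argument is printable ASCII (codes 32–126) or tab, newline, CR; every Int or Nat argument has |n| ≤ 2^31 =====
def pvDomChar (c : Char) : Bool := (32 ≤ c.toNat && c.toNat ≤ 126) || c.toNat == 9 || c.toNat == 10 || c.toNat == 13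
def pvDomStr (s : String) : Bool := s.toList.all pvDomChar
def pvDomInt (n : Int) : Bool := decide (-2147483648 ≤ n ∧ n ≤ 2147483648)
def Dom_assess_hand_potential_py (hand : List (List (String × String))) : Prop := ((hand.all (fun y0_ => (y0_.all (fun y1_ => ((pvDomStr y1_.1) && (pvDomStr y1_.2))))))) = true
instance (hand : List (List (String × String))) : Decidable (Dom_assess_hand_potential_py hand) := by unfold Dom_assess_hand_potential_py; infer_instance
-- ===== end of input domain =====

-- B replaces A's set/dict counting passes by sort + recursive run-length encoding; alternative decomposition, not claimed faster.

-- ===== PORT A =====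
def assess_hand_potential_py (hand : List (List (String × String))) : List (String × Int) :=
  if hand = [] then
    [("pairs", 0), ("three_of_a_kind", 0), ("straight", 0), ("flush", 0), ("high_cards", 0)]
  else
    let ranks := hand.map (fun card => (PySem.Dict.mk card).getD "rank" "?")
    let suits := hand.map (fun card => (PySem.Dict.mk card).getD "suit" "?")
    let rank_counts : PySem.Dict String Int :=
      (PySem.Set.ofList ranks).foldl (fun d r => d.insert r (ranks.count r : Int)) PySem.Dict.empty
    let suit_counts : PySem.Dict String Int :=
      (PySem.Set.ofList suits).foldl (fun d s => d.insert s (suits.count s : Int)) PySem.Dict.empty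
    let pairs := rank_counts.values.foldl (fun acc c => if c ≥ 2 then acc + 1 else acc) (0 : Int)
    let three := rank_counts.values.foldl (fun acc c => if c ≥ 3 then acc + 1 else acc) (0 : Int)
    let flush := if suit_counts.size ≠ 0 then (PySem.List.max? suit_counts.values (fun v => v)).getD 0 else 0
    let high : Int := ((ranks.filter (fun r => ["A", "K", "Q", "J"].contains r)).length : Int)
    [("pairs", pairs), ("three_of_a_kind", three), ("straight", 0), ("flush", flush), ("high_cards", high)]

-- ===== PORT B =====
-- recursive run-length encoding of a list (Source B's _runs)
def pvRuns : List String → List (String × Int)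
  | [] => []
  | x :: xs =>
    match pvRuns xs with
    | (y, c) :: t => if y == x then (x, c + 1) :: t else (x, 1) :: (y, c) :: t
    | [] => [(x, 1)]

def assess_hand_potential_py_alt (hand : List (List (String × String))) : List (String × Int) :=
  if hand = [] then
    [("pairs", 0), ("three_of_a_kind", 0), ("straight", 0), ("flush", 0), ("high_cards", 0)]
  else
    let ranks := PySem.List.sorted (hand.map (fun card => (PySem.Dict.mk card).getD "rank" "?")) (fun x => x) false
    let suits := PySem.List.sorted (hand.map (fun card => (PySem.Dict.mk card).getD "suit" "?")) (fun x => x) false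
    let pt := (pvRuns ranks).foldl
      (fun (pt : Int × Int) p => (if p.2 ≥ 2 then pt.1 + 1 else pt.1, if p.2 ≥ 3 then pt.2 + 1 else pt.2)) (0, 0)
    let flush := (pvRuns suits).foldl (fun f p => if p.2 > f then p.2 else f) (0 : Int)
    let high := ranks.foldl (fun acc r => if ["A", "K", "Q", "J"].contains r then acc + 1 else acc) (0 : Int)
    [("pairs", pt.1), ("three_of_a_kind", pt.2), ("straight", 0), ("flush", flush), ("high_cards", high)]

-- ===== PRECONDITION & SPEC =====
def Spec_assess_hand_potential_py (hand : List (List (String × String))) (out : List (String × Int)) : Prop := out = assess_hand_potential_py_alt hand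
instance (hand : List (List (String × String))) (out : List (String × Int)) : Decidable (Spec_assess_hand_potential_py hand out) := by unfold Spec_assess_hand_potential_py; infer_instance

-- ===== CLAIM (what is proved, stated in full; the proofs are below) =====
def Claim_equal_assess_hand_potential_py : Prop := ∀ (hand : List (List (String × String))), Dom_assess_hand_potential_py hand → Spec_assess_hand_potential_py hand (assess_hand_potential_py hand)

-- ===== LEMMAS AND PROOFS =====

theorem pvDiscardDiscard (s : List String) (x : String) :
    PySem.Set.discard (PySem.Set.discard s x) x = PySem.Set.discard s x := by
  simp [PySem.Set.discard, List.filter_filter]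

theorem pvDiscardConsSelf (s : List String) (x : String) :
    PySem.Set.discard (x :: s) x = PySem.Set.discard s x := by
  simp [PySem.Set.discard]

theorem pvDiscardNoMem (s : List String) (x : String) (h : x ∉ s) :
    PySem.Set.discard s x = s := by
  rw [PySem.Set.discard, List.filter_eq_self]
  intro y hy
  simp only [Bool.not_eq_eq_eq_not, Bool.not_true, beq_eq_false_iff_ne]
  exact fun e => h (e ▸ hy)

theorem pvCountCongr (x : String) (xs : List String) (S : List String)
    (hS : ∀ y ∈ S, y ≠ x) :
    S.map (fun y => (y, ((x :: xs).count y : Int))) = S.map (fun y => (y, (xs.count y : Int))) :=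
  List.map_congr_left fun y hy => by simp [Ne.symm (hS y hy)]

-- on a sorted list, pvRuns produces each distinct element paired with its multiplicity
theorem pvRuns_sorted : ∀ (l : List String), l.Pairwise (· ≤ ·) →
    pvRuns l = (PySem.Set.ofList l).map (fun x => (x, (l.count x : Int)))
  | [], _ => rfl
  | x :: xs, h => by
    obtain ⟨h1, h2⟩ := List.pairwise_cons.mp h
    have ih := pvRuns_sorted xs h2
    by_cases hmem : x ∈ xs
    · obtain ⟨z, zs, rfl⟩ : ∃ z zs, xs = z :: zs := by
        cases xs with
        | nil => simp at hmem
        | cons z zs => exact ⟨z, zs, rfl⟩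
      have hxz : x = z := le_antisymm (h1 z (by simp)) (by
        rcases List.mem_cons.mp hmem with h1' | h2'
        · exact le_of_eq h1'.symm
        · exact (List.pairwise_cons.mp h2).1 x h2')
      subst hxz
      rw [PySem.Set.ofList_cons] at ih
      simp only [List.map_cons] at ih
      show (match pvRuns (x :: zs) with
        | (y, c) :: t => if y == x then (x, c + 1) :: t else (x, 1) :: (y, c) :: t
        | [] => [(x, 1)]) = _
      rw [ih]
      simp only [beq_self_eq_true, if_true]
      rw [PySem.Set.ofList_cons, PySem.Set.ofList_cons, pvDiscardConsSelf, pvDiscardDiscard]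
      simp only [List.map_cons, List.count_cons_self]
      refine congrArg₂ _ (by push_cast; ring_nf) ?_
      exact (pvCountCongr x (x :: zs) _ fun y hy => ((PySem.Set.mem_discard _ _ _).mp hy).2).symm
    · have hnot : x ∉ PySem.Set.ofList xs := by
        rw [PySem.Set.mem_ofList]; exact hmem
      rw [PySem.Set.ofList_cons, pvDiscardNoMem _ _ hnot]
      have hcnt : (x :: xs).count x = 1 := by
        rw [List.count_cons_self, List.count_eq_zero.mpr hmem]
      have hmap : (PySem.Set.ofList xs).map (fun y => (y, ((x :: xs).count y : Int)))
          = (PySem.Set.ofList xs).map (fun y => (y, (xs.count y : Int))) :=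
        pvCountCongr x xs _ fun y hy => fun e =>
          hmem (e ▸ (PySem.Set.mem_ofList xs y).mp hy)
      cases xs with
      | nil => simp [pvRuns, PySem.Set.ofList]
      | cons z zs =>
        have hzx : (z == x) = false := by
          simp only [beq_eq_false_iff_ne]
          intro e; exact hmem (e ▸ List.mem_cons_self)
        have ih0 := ih
        rw [PySem.Set.ofList_cons] at ih
        simp only [List.map_cons] at ih
        show (match pvRuns (z :: zs) with
          | (y, c) :: t => if y == x then (x, c + 1) :: t else (x, 1) :: (y, c) :: t
          | [] => [(x, 1)]) = _
        rw [ih]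
        simp only [hzx, Bool.false_eq_true, if_false]
        rw [← ih, List.map_cons, hcnt, hmap, ← ih0]
        norm_num

-- A's count dict, built over the distinct elements, has items (r, count r)
theorem pvItemsCount (l : List String) :
    ((PySem.Set.ofList l).foldl (fun d r => d.insert r (l.count r : Int)) PySem.Dict.empty).items
      = (PySem.Set.ofList l).map (fun r => (r, (l.count r : Int))) := by
  have h := PySem.Dict.items_foldl_insert_fresh (PySem.Set.ofList l) (fun r => r)
    (fun r => (l.count r : Int)) PySem.Dict.empty
    (fun a _ => rfl) (by rw [List.map_id']; exact PySem.Set.nodup_ofList l)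
  simpa using h

theorem pvSortedSetPerm (l : List String) :
    (PySem.Set.ofList (PySem.List.sorted l (fun x => x) false)).Perm (PySem.Set.ofList l) :=
  (List.perm_ext_iff_of_nodup (PySem.Set.nodup_ofList _) (PySem.Set.nodup_ofList _)).mpr
    (fun a => by simp [PySem.Set.mem_ofList, PySem.List.mem_sorted])

theorem pvCountSorted (l : List String) (r : String) :
    (PySem.List.sorted l (fun x => x) false).count r = l.count r :=
  (PySem.List.sorted_perm l (fun x => x) false).count_eq r

theorem pvSortedPairwise (l : List String) :
    (PySem.List.sorted l (fun x => x) false).Pairwise (· ≤ ·) := by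
  simpa using PySem.List.sorted_pairwise l (fun x => x)

-- pairs / three_of_a_kind: A's per-distinct-rank count test = B's run-length test
theorem pvSideEq (l : List String) (p : Int → Prop) [DecidablePred p] :
    (((PySem.Set.ofList l).foldl (fun d r => d.insert r (l.count r : Int)) PySem.Dict.empty).values.foldl
        (fun acc c => if p c then acc + 1 else acc) (0 : Int))
    = (pvRuns (PySem.List.sorted l (fun x => x) false)).foldl
        (fun acc q => if p q.2 then acc + 1 else acc) (0 : Int) := by
  have hv : ((PySem.Set.ofList l).foldl (fun d r => d.insert r (l.count r : Int)) PySem.Dict.empty).values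
      = (PySem.Set.ofList l).map (fun r => (l.count r : Int)) := by
    simp only [PySem.Dict.values, pvItemsCount, List.map_map]
    rfl
  rw [hv, pvRuns_sorted _ (pvSortedPairwise l),
    PySem.List.foldl_ite_add_one, PySem.List.foldl_ite_add_one]
  congr 1
  norm_cast
  rw [List.countP_map, List.countP_map]
  have hc : List.countP ((fun q => decide (p q.2)) ∘ (fun x => (x, ((PySem.List.sorted l (fun x => x) false).count x : Int))))
      (PySem.Set.ofList (PySem.List.sorted l (fun x => x) false))
      = List.countP ((fun c => decide (p c)) ∘ (fun r => (l.count r : Int)))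
      (PySem.Set.ofList (PySem.List.sorted l (fun x => x) false)) :=
    List.countP_congr (fun x _ => by simp [pvCountSorted])
  rw [hc]
  exact ((pvSortedSetPerm l).countP_eq _).symm

-- flush: A's max over per-distinct-suit counts = B's running max over run lengths
theorem pvFlushEq (l : List String) (hne : l ≠ []) :
    (if (((PySem.Set.ofList l).foldl (fun d r => d.insert r (l.count r : Int)) PySem.Dict.empty).size ≠ 0) then
      (PySem.List.max? (((PySem.Set.ofList l).foldl (fun d r => d.insert r (l.count r : Int)) PySem.Dict.empty).values) (fun v => v)).getD 0
    else 0)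
    = (pvRuns (PySem.List.sorted l (fun x => x) false)).foldl (fun f q => if q.2 > f then q.2 else f) (0 : Int) := by
  have hv : ((PySem.Set.ofList l).foldl (fun d r => d.insert r (l.count r : Int)) PySem.Dict.empty).values
      = (PySem.Set.ofList l).map (fun r => (l.count r : Int)) := by
    simp only [PySem.Dict.values, pvItemsCount, List.map_map]
    rfl
  have hsz : ((PySem.Set.ofList l).foldl (fun d r => d.insert r (l.count r : Int)) PySem.Dict.empty).size
      = (PySem.Set.ofList l).length := by
    simp only [PySem.Dict.size, pvItemsCount, List.length_map]
  obtain ⟨a, S', hS⟩ : ∃ a S', PySem.Set.ofList l = a :: S' := by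
    cases hS0 : PySem.Set.ofList l with
    | nil =>
      exfalso
      cases l with
      | nil => exact hne rfl
      | cons b bs =>
        have : b ∈ PySem.Set.ofList (b :: bs) := (PySem.Set.mem_ofList _ _).mpr List.mem_cons_self
        rw [hS0] at this; simp at this
    | cons a S' => exact ⟨a, S', rfl⟩
  have hmax : (fun (f : Int) (q : String × Int) => if q.2 > f then q.2 else f)
      = fun f q => max f q.2 := by
    funext f q
    by_cases h : q.2 > f
    · simp [h]; omega
    · simp [h]; omega
  rw [hmax, pvRuns_sorted _ (pvSortedPairwise l), List.foldl_map]
  rw [PySem.List.foldl_congr_mem _ _ (fun (x : Int) (y : String) => max x ((l.count y : Int))) _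
    (fun acc x _ => by rw [pvCountSorted])]
  rw [← List.foldl_map (f := fun r => ((l.count r : Int))) (g := max)]
  have hperm : ((PySem.Set.ofList (PySem.List.sorted l (fun x => x) false)).map (fun r => ((l.count r : Int)))).Perm
      ((PySem.Set.ofList l).map (fun r => ((l.count r : Int)))) := (pvSortedSetPerm l).map _
  rw [hperm.foldl_eq 0, hsz, hv, hS, List.map_cons]
  simp only [List.length_cons, PySem.List.max?_id_cons, Option.getD_some, List.foldl_cons]
  rw [if_pos (by omega)]
  rw [max_eq_right (Int.natCast_nonneg _)]

-- high_cards
theorem pvHighEq (l : List String) :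
    (((l.filter (fun r => ["A", "K", "Q", "J"].contains r)).length : Nat) : Int)
    = (PySem.List.sorted l (fun x => x) false).foldl
        (fun acc r => if ["A", "K", "Q", "J"].contains r then acc + 1 else acc) (0 : Int) := by
  rw [PySem.List.foldl_if_add_one, (PySem.List.sorted_perm l (fun x => x) false).countP_eq,
    List.countP_eq_length_filter]
  simp only [zero_add]

-- ===== VERDICT (by name: the statement is the Claim_ definition above) =====
theorem assess_hand_potential_py_spec : Claim_equal_assess_hand_potential_py := by
  intro hand _
  unfold Spec_assess_hand_potential_py
  by_cases hne : hand = []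
  · subst hne; rfl
  · simp only [assess_hand_potential_py, assess_hand_potential_py_alt, if_neg hne]
    rw [PySem.List.foldl_prod_mk (f := fun (a : Int) (p : String × Int) => if p.2 ≥ 2 then a + 1 else a)
      (g := fun (a : Int) (p : String × Int) => if p.2 ≥ 3 then a + 1 else a)]
    refine congrArg₂ _ (congrArg _ ?_) (congrArg₂ _ (congrArg _ ?_) (congrArg₂ _ rfl
      (congrArg₂ _ (congrArg _ ?_) (congrArg₂ _ (congrArg _ ?_) rfl))))
    · exact pvSideEq _ (fun c => c ≥ 2)
    · exact pvSideEq _ (fun c => c ≥ 3)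
    · exact pvFlushEq _ (by simpa using hne)
    · exact pvHighEq _
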